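-- pv_equiv track=rewrite | github.com/benjamea/coursework-upstream | hw4/hw4.py | create_password
-- ===== SOURCE A (Python) =====
-- def compute_strength(password):
--     """
--     Compute the strength of a password.
--
--     Args:
--         password (str): The password to evaluate
--
--     Returns:
--         int: The strength score (non-negative integer)
--     """
--     strength = 0
--
--     for char in password:
--         char_code = ord(char)
--         if 48 <= char_code <= 57:  # digits 0-9
--             strength += 2
--         elif 65 <= char_code <= 90:  # uppercase A-Z
--             strength += 1
--         elif 33 <= char_code <= 47:  # special ! through /
--             strength += 2
--
--     if len(password) > 8:
--         strength += 3
--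
--     return strength
--
-- def create_password(phrase, strength):
--     """
--     Create a password from a phrase using first letters of each word.
--
--     Args:
--         phrase (str): The phrase to create password from
--         strength (int): The desired minimum strength
--
--     Returns:
--         str: The generated password
--     """
--     words = phrase.split()
--     password = ""
--
--     for word in words:
--         password = password + word[0]
--
--     while compute_strength(password) < strength:
--         password = password + "!"
--
--     return password
-- ===== SOURCE B (Python) =====
-- def needed_bangs(strength, s, L):
--     """Smallest m >= 0 with s + 2*m + (3 if L + m > 8 else 0) >= strength, closed form."""
--     bonus = 3 if L > 8 else 0
--     need = strength - s - bonus
--     if need <= 0: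
--         return 0
--     m = (need + 1) // 2
--     if L <= 8 and L + m > 8:
--         # crossing the 8-length boundary grants the +3 bonus
--         m = max((strength - s - 3 + 1) // 2, 9 - L)
--     return m
--
--
-- def create_password(phrase, strength):
--     base = "".join(w[0] for w in phrase.split())
--     s = sum(2 if ('0' <= c <= '9' or '!' <= c <= '/') else (1 if 'A' <= c <= 'Z' else 0)
--             for c in base)
--     return base + "!" * needed_bangs(strength, s, len(base))
-- ===== Notes on version B (the rewrite author's own statement) =====
-- stated objective: faster
-- what changed: A repeatedly appends '!' and rescans the whole password to recompute its strength each iteration; B computes the base score and length once and derives the number of '!' paddings by a closed-form formula (each '!' adds 2, passing length 8 adds 3), building the string in one step.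
import Mathlib
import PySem

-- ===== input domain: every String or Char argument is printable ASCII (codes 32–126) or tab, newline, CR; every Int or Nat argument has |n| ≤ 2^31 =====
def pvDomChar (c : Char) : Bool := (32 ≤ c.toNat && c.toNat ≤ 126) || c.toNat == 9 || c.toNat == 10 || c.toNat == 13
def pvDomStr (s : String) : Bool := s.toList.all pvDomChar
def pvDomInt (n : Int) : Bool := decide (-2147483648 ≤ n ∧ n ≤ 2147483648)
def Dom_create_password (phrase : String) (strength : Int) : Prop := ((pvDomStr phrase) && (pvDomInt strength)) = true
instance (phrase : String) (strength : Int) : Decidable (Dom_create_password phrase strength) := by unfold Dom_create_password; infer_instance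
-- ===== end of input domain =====

-- B replaces A's "append '!' and re-score the whole password" while-loop by a single
-- closed-form count of '!' padding computed from the base score and length (objective: faster).

-- ===== PORT A =====

-- helper `compute_strength` of A, on the code points (strings are ported via List Char)
def compute_strength (password : List Char) : Int :=
  let strength := password.foldl (fun strength char =>
    let char_code : Int := char.toNat
    if 48 ≤ char_code ∧ char_code ≤ 57 then strength + 2
    else if 65 ≤ char_code ∧ char_code ≤ 90 then strength + 1
    else if 33 ≤ char_code ∧ char_code ≤ 47 then strength + 2
    else strength) 0
  if (password.length : Int) > 8 then strength + 3 else strength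

-- termination fact for A's while-loop: appending '!' raises the strength by at least 2
lemma compute_strength_append_bang (pw : List Char) :
    compute_strength pw + 2 ≤ compute_strength (pw ++ ['!']) := by
  have h33 : (('!'.toNat : Nat) : Int) = 33 := by decide
  simp only [compute_strength, List.foldl_append, List.foldl_cons, List.foldl_nil,
    List.length_append, List.length_cons, List.length_nil, h33]
  norm_num
  split_ifs <;> omega

-- A's `while compute_strength(password) < strength: password = password + "!"`
def pwWhile (strength : Int) (password : List Char) : List Char :=
  if compute_strength password < strength then pwWhile strength (password ++ ['!'])
  else password
termination_by (strength - compute_strength password).toNat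
decreasing_by
  have := compute_strength_append_bang password
  omega

def create_password (phrase : String) (strength : Int) : String :=
  let words := PySem.Str.split₀ phrase
  let password := words.foldl (fun password word =>
    match PySem.Str.pyGet? word 0 with   -- word[0]; words from split() are nonempty, never none
    | some c => password ++ [c]
    | none => password) []
  String.ofList (pwWhile strength password)

-- ===== PORT B =====

-- helper `needed_bangs` of B: smallest m ≥ 0 with s + 2m + (3 if L+m > 8 else 0) ≥ strength
def needed_bangs (strength s L : Int) : Int :=
  let bonus : Int := if L > 8 then 3 else 0
  let need := strength - s - bonus
  if need ≤ 0 then 0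
  else
    let m := PySem.Int.floordiv (need + 1) 2
    if L ≤ 8 ∧ L + m > 8 then
      max (PySem.Int.floordiv (strength - s - 3 + 1) 2) (9 - L)
    else m

def create_password_alt (phrase : String) (strength : Int) : String :=
  let base := (PySem.Str.split₀ phrase).flatMap (fun w =>
    match PySem.Str.pyGet? w 0 with
    | some c => [c]
    | none => [])
  let s := (base.map (fun c =>
    if ('0' ≤ c ∧ c ≤ '9') ∨ ('!' ≤ c ∧ c ≤ '/') then (2 : Int)
    else if 'A' ≤ c ∧ c ≤ 'Z' then 1 else 0)).sum
  String.ofList (base ++ PySem.List.pyRepeat ['!'] (needed_bangs strength s base.length))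

-- ===== PRECONDITION & SPEC =====
def Spec_create_password (phrase : String) (strength : Int) (out : String) : Prop := out = create_password_alt phrase strength
instance (phrase : String) (strength : Int) (out : String) : Decidable (Spec_create_password phrase strength out) := by unfold Spec_create_password; infer_instance

-- ===== CLAIM (what is proved, stated in full; the proofs are below) =====
def Claim_equal_create_password : Prop := ∀ (phrase : String) (strength : Int), Dom_create_password phrase strength → Spec_create_password phrase strength (create_password phrase strength)

-- ===== LEMMAS AND PROOFS =====

-- the char score A's fold adds, as a function
def scoreA (c : Char) : Int :=
  if 48 ≤ (c.toNat : Int) ∧ (c.toNat : Int) ≤ 57 then 2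
  else if 65 ≤ (c.toNat : Int) ∧ (c.toNat : Int) ≤ 90 then 1
  else if 33 ≤ (c.toNat : Int) ∧ (c.toNat : Int) ≤ 47 then 2
  else 0

lemma foldlA_eq_sum (pw : List Char) :
    pw.foldl (fun strength char =>
      let char_code : Int := char.toNat
      if 48 ≤ char_code ∧ char_code ≤ 57 then strength + 2
      else if 65 ≤ char_code ∧ char_code ≤ 90 then strength + 1
      else if 33 ≤ char_code ∧ char_code ≤ 47 then strength + 2
      else strength) 0 = (pw.map scoreA).sum := by
  have h : (fun (strength : Int) (char : Char) =>
      let char_code : Int := char.toNat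
      if 48 ≤ char_code ∧ char_code ≤ 57 then strength + 2
      else if 65 ≤ char_code ∧ char_code ≤ 90 then strength + 1
      else if 33 ≤ char_code ∧ char_code ≤ 47 then strength + 2
      else strength) = fun strength char => strength + scoreA char := by
    funext st c
    simp only [scoreA]
    split_ifs <;> omega
  rw [h, PySem.List.foldl_add, zero_add]

lemma compute_strength_eq (pw : List Char) :
    compute_strength pw
      = (pw.map scoreA).sum + (if (pw.length : Int) > 8 then 3 else 0) := by
  simp only [compute_strength, foldlA_eq_sum]
  split_ifs <;> omega

lemma scoreB_eq_scoreA (c : Char) :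
    (if ('0' ≤ c ∧ c ≤ '9') ∨ ('!' ≤ c ∧ c ≤ '/') then (2 : Int)
     else if 'A' ≤ c ∧ c ≤ 'Z' then 1 else 0) = scoreA c := by
  have hle : ∀ a b : Char, (a ≤ b) ↔ (a.toNat ≤ b.toNat) := fun a b => by
    rw [Char.le_def]; exact UInt32.le_iff_toNat_le
  have c0 : '0'.toNat = 48 := rfl
  have c9 : '9'.toNat = 57 := rfl
  have cb : '!'.toNat = 33 := rfl
  have cs : '/'.toNat = 47 := rfl
  have ca : 'A'.toNat = 65 := rfl
  have cz : 'Z'.toNat = 90 := rfl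
  simp only [scoreA, hle, c0, c9, cb, cs, ca, cz]
  split_ifs <;> omega

lemma needed_bangs_nonneg (t s L : Int) : 0 ≤ needed_bangs t s L := by
  simp only [needed_bangs, PySem.Int.floordiv_eq_ediv_of_pos (show (0:Int) < 2 by norm_num)]
  split_ifs <;> omega

lemma needed_bangs_step (t s L : Int) (h : s + (if L > 8 then 3 else 0) < t) :
    needed_bangs t s L = needed_bangs t (s + 2) (L + 1) + 1 := by
  simp only [needed_bangs, PySem.Int.floordiv_eq_ediv_of_pos (show (0:Int) < 2 by norm_num)]
  split_ifs at * <;> omega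

lemma scoreA_bang : scoreA '!' = 2 := by decide

lemma pwWhile_eq (t : Int) (pw : List Char) :
    pwWhile t pw
      = pw ++ List.replicate (needed_bangs t ((pw.map scoreA).sum) (pw.length : Int)).toNat '!' := by
  fun_induction pwWhile t pw with
  | case1 pw h ih =>
    rw [ih]
    have hcs := compute_strength_eq pw
    have hsum : ((pw ++ ['!']).map scoreA).sum = (pw.map scoreA).sum + 2 := by
      simp [scoreA_bang]
    have hlen : (((pw ++ ['!']).length : Nat) : Int) = (pw.length : Int) + 1 := by
      simp
    rw [hsum, hlen]
    have hstep : needed_bangs t ((pw.map scoreA).sum) (pw.length : Int)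
        = needed_bangs t ((pw.map scoreA).sum + 2) ((pw.length : Int) + 1) + 1 := by
      apply needed_bangs_step
      omega
    have hnn := needed_bangs_nonneg t ((pw.map scoreA).sum + 2) ((pw.length : Int) + 1)
    rw [hstep]
    have : (needed_bangs t ((pw.map scoreA).sum + 2) ((pw.length : Int) + 1) + 1).toNat
        = (needed_bangs t ((pw.map scoreA).sum + 2) ((pw.length : Int) + 1)).toNat + 1 := by
      omega
    rw [this, List.replicate_succ, List.append_assoc]
    rfl
  | case2 pw h =>
    have hcs := compute_strength_eq pw
    have h0 : needed_bangs t ((pw.map scoreA).sum) (pw.length : Int) = 0 := by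
      simp only [needed_bangs]
      split_ifs <;> omega
    simp [h0]

-- A's fold building the initials equals B's flatMap
lemma initials_eq (ws : List String) :
    ws.foldl (fun password word =>
      match PySem.Str.pyGet? word 0 with
      | some c => password ++ [c]
      | none => password) []
      = ws.flatMap (fun w =>
          match PySem.Str.pyGet? w 0 with
          | some c => [c]
          | none => []) := by
  have h : (fun (password : List Char) (word : String) =>
      match PySem.Str.pyGet? word 0 with
      | some c => password ++ [c]
      | none => password)
      = fun password word => password ++
          (match PySem.Str.pyGet? word 0 with
           | some c => [c]
           | none => []) := by
    funext pw w
    cases PySem.Str.pyGet? w 0 <;> simp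
  rw [h, PySem.List.foldl_append_eq_flatMap]
  simp

-- ===== VERDICT (by name: the statement is the Claim_ definition above) =====
theorem create_password_spec : Claim_equal_create_password := by
  intro phrase strength _
  unfold Spec_create_password create_password create_password_alt
  simp only [initials_eq, pwWhile_eq, PySem.List.pyRepeat_singleton, scoreB_eq_scoreA]
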